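-- pv_equiv track=rewrite | github.com/Seralejjj/inf-111 | prac2/cadenas/cad2.py | transformar_cadena
-- ===== SOURCE A (Python) =====
-- def transformar_cadena(cadena):
--     vocales = "aeiouAEIOU "
--     resultado = ""
--     for letra in cadena:
--         if letra not in vocales:
--             resultado += letra * 2
--         else:
--             resultado += letra
--     return resultado
-- ===== SOURCE B (Python) =====
-- import re
--
-- def transformar_cadena(cadena):
--     return re.sub(r'[^aeiouAEIOU ]', lambda m: m.group(0) * 2, cadena)
-- ===== Notes on version B (the rewrite author's own statement) =====
-- stated objective: idiomatic
-- what changed: Replaced the explicit character loop with string concatenation by a single regex substitution that doubles every character outside the vowel/space class via a replacement callback.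
import Mathlib
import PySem

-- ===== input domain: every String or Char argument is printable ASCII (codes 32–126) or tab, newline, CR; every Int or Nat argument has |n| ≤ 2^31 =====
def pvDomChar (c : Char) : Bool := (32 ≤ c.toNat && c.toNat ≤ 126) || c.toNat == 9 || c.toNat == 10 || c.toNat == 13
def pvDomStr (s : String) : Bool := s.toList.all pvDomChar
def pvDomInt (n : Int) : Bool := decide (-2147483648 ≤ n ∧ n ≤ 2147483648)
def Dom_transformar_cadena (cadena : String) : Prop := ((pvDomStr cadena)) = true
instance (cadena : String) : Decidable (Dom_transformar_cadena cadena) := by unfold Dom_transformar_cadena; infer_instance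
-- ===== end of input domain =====

-- B doubles non-vowel/non-space characters with a single regex substitution instead of A's explicit loop; idiomatic rewrite, same value everywhere.

-- ===== PORT A =====
-- 'vocales' membership test, as in A: letra in "aeiouAEIOU "
def pvVocales : List Char := "aeiouAEIOU ".toList

def transformar_cadena (cadena : String) : String :=
  -- for letra in cadena: resultado += letra*2 / letra
  String.mk (cadena.toList.foldl (fun resultado letra =>
    if ¬ (letra ∈ pvVocales) then resultado ++ [letra, letra] else resultado ++ [letra]) [])

-- ===== PORT B =====
-- regex class [^aeiouAEIOU ]: a char matches iff it is not a vowel/space; re.sub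
-- replaces every matched char by its double, leaving non-matches unchanged —
-- ported as a flatMap over the characters (exact for a single-char class).
def pvMatchesClass (c : Char) : Bool := !(pvVocales.contains c)

def transformar_cadena_alt (cadena : String) : String :=
  String.mk (cadena.toList.flatMap (fun c => if pvMatchesClass c then [c, c] else [c]))

-- ===== PRECONDITION & SPEC =====
def Spec_transformar_cadena (cadena : String) (out : String) : Prop := out = transformar_cadena_alt cadena
instance (cadena : String) (out : String) : Decidable (Spec_transformar_cadena cadena out) := by unfold Spec_transformar_cadena; infer_instance

-- ===== CLAIM (what is proved, stated in full; the proofs are below) =====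
def Claim_equal_transformar_cadena : Prop := ∀ (cadena : String), Dom_transformar_cadena cadena → Spec_transformar_cadena cadena (transformar_cadena cadena)

-- ===== LEMMAS AND PROOFS =====
theorem pv_foldl_eq_flatMap (l : List Char) (acc : List Char) :
    l.foldl (fun resultado letra =>
      if ¬ (letra ∈ pvVocales) then resultado ++ [letra, letra] else resultado ++ [letra]) acc
    = acc ++ l.flatMap (fun c => if pvMatchesClass c then [c, c] else [c]) := by
  induction l generalizing acc with
  | nil => simp
  | cons c t ih =>
    simp only [List.foldl_cons, List.flatMap_cons, ih, pvMatchesClass]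
    by_cases h : c ∈ pvVocales <;> simp [h]

-- ===== VERDICT (by name: the statement is the Claim_ definition above) =====
theorem transformar_cadena_spec : Claim_equal_transformar_cadena := by
  intro cadena _
  unfold Spec_transformar_cadena transformar_cadena transformar_cadena_alt
  rw [pv_foldl_eq_flatMap]
  simp
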